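/- GENERATED by tools/from_farm_form.py from prooffarm-gif/accepted/digest_byte/Proof.lean (a worked proof of the farm's unit `digest_byte`,
   accepted by the verdict) — do not edit. -/
import Gif.Spec.Units.digest_byte
import Gif.Spec.AllSegs

open X86 X86.User Asan ProgX.Base ProgX.Base.Spec Gif.Spec

set_option maxRecDepth 4000
set_option maxHeartbeats 4000000

/-- `digest_byte(rdi = h, esi = b)` (gif_driver.c:89-93) satisfies `Gif.Spec.digest_byte.spec`: a leaf of five instructions
(`movzx eax, sil ; xor rax, rdi ; movabs rdx, FNV_PRIME ; imul rax, rdx ; ret`) without a frame and without a memory access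
other than the `ret`'s load of the return address: the memory at the return is the memory at the entry. -/
theorem Gif.Spec.Proved.digest_byte_ok : Gif.Spec.digest_byte.Statement := by
  intro Lay hLay μ hμ u₀ hcode u ret he hpre
  v_entry he
  -- 0x105240 … 0x105255: `movzx eax, sil ; xor rax, rdi ; movabs rdx, 0x100000001b3 ; imul rax, rdx ; ret` (gif_driver.c:90-93)
  u_walk hcode [hμ.vendor] span [ProgX.Base.L.textLo, ProgX.Base.L.textHi] side (v_side)
  -- 0x105255 `ret`: the contract's `Returned`
  refine ReachVia.done ?_
  v_returned
  -- the post: no store was made, the memory is the entry's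
  show s_105255.mem = u.mem
  exact w_mem
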